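-- pv_equiv track=rewrite | github.com/treeleaves30760/NNUE-mlx | src/training/_workers.py | _split_work
-- ===== SOURCE A (Python) =====
-- from typing import Dict, List, Optional, Tuple
--
-- def _split_work(num_games: int, workers: int) -> List[int]:
--     """Split num_games into chunks for workers."""
--     chunk_size = max(1, num_games // (workers * 4))
--     chunks = []
--     remaining = num_games
--     while remaining > 0:
--         n = min(chunk_size, remaining)
--         chunks.append(n)
--         remaining -= n
--     return chunks
-- ===== SOURCE B (Python) =====
-- from typing import Dict, List, Optional, Tuple
--
-- def _split_work(num_games: int, workers: int) -> List[int]: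
--     """Split num_games into chunks for workers (closed-form divmod version)."""
--     chunk_size = max(1, num_games // (workers * 4))
--     if num_games <= 0:
--         return []
--     q, r = divmod(num_games, chunk_size)
--     return [chunk_size] * q + ([r] if r else [])
-- ===== Notes on version B (the rewrite author's own statement) =====
-- stated objective: simpler
-- what changed: Replaced the subtract-until-empty while loop with a closed-form divmod: k full chunks of chunk_size plus an optional remainder chunk, so no per-chunk subtraction loop.
import Mathlib
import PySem

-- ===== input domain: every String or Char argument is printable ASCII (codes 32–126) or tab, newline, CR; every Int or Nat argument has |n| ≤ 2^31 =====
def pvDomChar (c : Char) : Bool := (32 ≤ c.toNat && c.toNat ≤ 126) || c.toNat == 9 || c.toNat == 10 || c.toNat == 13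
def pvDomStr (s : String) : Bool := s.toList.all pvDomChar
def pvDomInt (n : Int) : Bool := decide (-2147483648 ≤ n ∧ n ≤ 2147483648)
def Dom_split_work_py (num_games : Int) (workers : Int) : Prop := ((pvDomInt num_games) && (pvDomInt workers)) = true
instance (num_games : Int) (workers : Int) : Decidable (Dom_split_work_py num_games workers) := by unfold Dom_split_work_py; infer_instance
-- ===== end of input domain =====

-- B replaces A's subtract-until-empty loop with a closed-form divmod; same return value, simpler.

-- ===== PORT A =====
-- the while loop of A: while remaining > 0: n = min(chunk_size, remaining); chunks.append(n); remaining -= n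
def splitLoopA (chunk : Int) (hc : 1 ≤ chunk) (remaining : Int) : List Int :=
  if remaining > 0 then
    min chunk remaining :: splitLoopA chunk hc (remaining - min chunk remaining)
  else []
termination_by remaining.toNat
decreasing_by omega

def split_work_py (num_games : Int) (workers : Int) : List Int :=
  let chunk_size : Int := max 1 (PySem.Int.floordiv num_games (workers * 4))
  splitLoopA chunk_size (le_max_left _ _) num_games

-- ===== PORT B =====
def split_work_py_alt (num_games : Int) (workers : Int) : List Int :=
  let chunk_size : Int := max 1 (PySem.Int.floordiv num_games (workers * 4))
  if num_games ≤ 0 then []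
  else
    let q := PySem.Int.floordiv num_games chunk_size
    let r := PySem.Int.mod num_games chunk_size
    List.replicate q.toNat chunk_size ++ (if r ≠ 0 then [r] else [])

-- ===== PRECONDITION & SPEC =====
-- Pre_ excludes exactly workers = 0, where Python A raises ZeroDivisionError.
def Pre_split_work_py (num_games : Int) (workers : Int) : Prop := workers ≠ 0
instance (num_games : Int) (workers : Int) : Decidable (Pre_split_work_py num_games workers) := by unfold Pre_split_work_py; infer_instance
def pvWitness_split_work_py : Int × Int := (10, 2)

def Spec_split_work_py (num_games : Int) (workers : Int) (out : List Int) : Prop := out = split_work_py_alt num_games workers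
instance (num_games : Int) (workers : Int) (out : List Int) : Decidable (Spec_split_work_py num_games workers out) := by unfold Spec_split_work_py; infer_instance

-- ===== CLAIM (what is proved, stated in full; the proofs are below) =====
def Claim_equal_split_work_py : Prop := ∀ (num_games : Int) (workers : Int), Dom_split_work_py num_games workers → Pre_split_work_py num_games workers → Spec_split_work_py num_games workers (split_work_py num_games workers)

-- ===== LEMMAS AND PROOFS =====

-- A's loop, for 0 ≤ n and chunk c ≥ 1, produces floor(n/c) copies of c plus the nonzero remainder.
theorem splitLoopA_eq (c : Int) (hc : 1 ≤ c) (n : Int) (hn : 0 ≤ n) :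
    splitLoopA c hc n =
      List.replicate (n / c).toNat c ++ (if n % c ≠ 0 then [n % c] else []) := by
  induction hk : n.toNat using Nat.strong_induction_on generalizing n with
  | _ k ih =>
    rw [splitLoopA]
    by_cases hpos : n > 0
    · simp only [hpos, dif_pos]
      by_cases hlt : n < c
      · -- last, partial chunk: min c n = n, remaining becomes 0
        have hmin : min c n = n := by omega
        rw [hmin, sub_self, splitLoopA]
        have hdiv : n / c = 0 := Int.ediv_eq_zero_of_lt hn hlt
        have hmod : n % c = n := Int.emod_eq_of_lt hn hlt
        simp [hdiv, hmod]
        omega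
      · -- full chunk: min c n = c
        have hmin : min c n = c := by omega
        rw [hmin]
        have hcne : c ≠ 0 := by omega
        rw [ih (n - c).toNat (by omega) (n - c) (by omega) rfl]
        have hdiv : (n - c) / c = n / c - 1 := by
          have h2 : n - c = n + -1 * c := by ring
          rw [h2, Int.add_mul_ediv_right n (-1) hcne]; ring
        have hmod : (n - c) % c = n % c := Int.sub_emod_right n c
        have hq1 : 1 ≤ n / c := by
          rw [Int.le_ediv_iff_mul_le (by omega : (0:Int) < c)]
          omega
        have hrep : (n / c).toNat = ((n - c) / c).toNat + 1 := by omega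
        rw [hrep, hmod, List.replicate_succ]
        simp
    · simp only [hpos, if_false]
      have hn0 : n = 0 := by omega
      simp [hn0]

-- ===== VERDICT (by name: the statement is the Claim_ definition above) =====
theorem split_work_py_spec : Claim_equal_split_work_py := by
  intro num_games workers _ _
  unfold Spec_split_work_py split_work_py split_work_py_alt
  set c : Int := max 1 (PySem.Int.floordiv num_games (workers * 4)) with hc
  have hc1 : 1 ≤ c := le_max_left _ _
  by_cases hle : num_games ≤ 0
  · -- loop body never runs; B returns [] directly
    rw [splitLoopA]
    simp [hle]
  · simp only [hle, if_false]
    rw [splitLoopA_eq c hc1 num_games (by omega)]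
    rw [PySem.Int.floordiv_eq_ediv_of_pos (by omega), PySem.Int.mod_eq_emod_of_pos (by omega)]
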